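-- pv_equiv track=rewrite | github.com/Chilianxin/FDA | fda/data/splits.py | purged_embargo_splits
-- ===== SOURCE A (Python) =====
-- from typing import List, Tuple
--
-- def purged_embargo_splits(dates: List[str], train_months: int = 12, val_months: int = 3, test_months: int = 3, embargo_days: int = 20) -> List[Tuple[List[str], List[str], List[str]]]:
--     # naive monthly buckets by YYYYMM
--     months = sorted({d[:6] for d in dates})
--     i = 0
--     result = []
--     while i + train_months + val_months + test_months <= len(months):
--         train_m = months[i:i+train_months]
--         val_m = months[i+train_months:i+train_months+val_months]
--         test_m = months[i+train_months+val_months:i+train_months+val_months+test_months]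
--         # expand to dates
--         train = [d for d in dates if d[:6] in train_m]
--         val = [d for d in dates if d[:6] in val_m]
--         test = [d for d in dates if d[:6] in test_m]
--         # embargo naive removal: drop last embargo_days from train
--         if len(train) > embargo_days:
--             train = train[:-embargo_days]
--         result.append((train, val, test))
--         i += test_months
--     return result
-- ===== SOURCE B (Python) =====
-- def purged_embargo_splits(dates, train_months=12, val_months=3, test_months=3, embargo_days=20):
--     # one pass per window: rank each date's month once, then classify dates by rank range
--     months = sorted({d[:6] for d in dates})
--     rank = {m: j for j, m in enumerate(months)}
--     total = train_months + val_months + test_months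
--     result = []
--     i = 0
--     while i + total <= len(months):
--         train, val, test = [], [], []
--         for d in dates:
--             r = rank[d[:6]] - i
--             if r < 0 or r >= total:
--                 continue
--             if r < train_months:
--                 train.append(d)
--             elif r < train_months + val_months:
--                 val.append(d)
--             else:
--                 test.append(d)
--         if len(train) > embargo_days:
--             train = train[:-embargo_days]
--         result.append((train, val, test))
--         i += test_months
--     return result
-- ===== Notes on version B (the rewrite author's own statement) =====
-- stated objective: alternative
-- what changed: B builds a month-to-rank dict once and classifies each date into train/val/test in a single pass per window by comparing its rank to the window bounds, instead of A's three filtering passes per window each testing membership in a sliced month list.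
-- outside the precondition, e.g. on purged_embargo_splits(['1', '2'], -1, 1, 2, 9): A returns [(['1'], [], ['1', '2'])], B returns [([], [], ['1', '2'])]
import Mathlib
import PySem

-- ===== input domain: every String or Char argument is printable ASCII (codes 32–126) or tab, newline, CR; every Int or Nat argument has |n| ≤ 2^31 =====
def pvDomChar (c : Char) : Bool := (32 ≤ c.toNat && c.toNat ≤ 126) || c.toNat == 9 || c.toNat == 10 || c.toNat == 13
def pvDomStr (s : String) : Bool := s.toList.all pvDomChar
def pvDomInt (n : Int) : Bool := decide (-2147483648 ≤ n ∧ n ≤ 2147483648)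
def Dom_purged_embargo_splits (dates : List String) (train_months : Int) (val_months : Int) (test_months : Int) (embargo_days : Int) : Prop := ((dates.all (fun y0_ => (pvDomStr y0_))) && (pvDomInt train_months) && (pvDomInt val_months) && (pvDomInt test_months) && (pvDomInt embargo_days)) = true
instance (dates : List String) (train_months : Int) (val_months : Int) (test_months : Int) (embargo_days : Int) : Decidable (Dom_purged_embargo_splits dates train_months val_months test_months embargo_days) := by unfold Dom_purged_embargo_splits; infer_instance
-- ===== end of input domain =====

-- B replaces A's per-window membership filters over sliced month lists by a month→rank dict
-- built once and a single classifying pass over dates per window (objective: alternative).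

-- ===== PORT A =====
-- d[:6]
def pvMonthOf (d : String) : String := PySem.Str.slice d none (some 6)

-- months = sorted({d[:6] for d in dates})  (shared first line of A and B)
def pvMonthsOf (dates : List String) : List String :=
  PySem.List.sorted (PySem.Set.ofList (dates.map pvMonthOf)) (fun x => x) false

-- the while loop of A; fuel only makes the recursion total (under Pre_ the exit is the loop condition)
def pvAGo (dates months : List String) (tm vm tsm e : Int) :
    Nat → Int → List (List String × List String × List String) →
    List (List String × List String × List String)
  | 0, _, acc => acc
  | fuel+1, i, acc =>
    if i + tm + vm + tsm ≤ (months.length : Int) then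
      let train_m := PySem.List.slice months (some i) (some (i + tm))
      let val_m := PySem.List.slice months (some (i + tm)) (some (i + tm + vm))
      let test_m := PySem.List.slice months (some (i + tm + vm)) (some (i + tm + vm + tsm))
      let train0 := dates.filter (fun d => train_m.contains (pvMonthOf d))
      let val := dates.filter (fun d => val_m.contains (pvMonthOf d))
      let test := dates.filter (fun d => test_m.contains (pvMonthOf d))
      let train := if e < (train0.length : Int) then PySem.List.slice train0 none (some (-e)) else train0
      pvAGo dates months tm vm tsm e fuel (i + tsm) (acc ++ [(train, val, test)])
    else acc

def purged_embargo_splits (dates : List String) (train_months : Int) (val_months : Int) (test_months : Int) (embargo_days : Int) : List (List String × List String × List String) :=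
  let months := pvMonthsOf dates
  pvAGo dates months train_months val_months test_months embargo_days (months.length + 1) 0 []

-- ===== PORT B =====
-- rank = {m: j for j, m in enumerate(months)}
def pvRankOf (months : List String) : PySem.Dict String Int :=
  (PySem.List.enumerate months 0).foldl (fun d p => d.insert p.2 p.1) PySem.Dict.empty

-- the body of B's "for d in dates" classifying pass
def pvClassify (rank : PySem.Dict String Int) (i tm vm total : Int)
    (acc : List String × List String × List String) (d : String) :
    List String × List String × List String :=
  match rank.get? (pvMonthOf d) with
  | none => acc  -- unreachable: every date's month is a key of rank (Python's rank[d[:6]] never misses)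
  | some r0 =>
    let r := r0 - i
    if r < 0 ∨ total ≤ r then acc
    else if r < tm then (acc.1 ++ [d], acc.2.1, acc.2.2)
    else if r < tm + vm then (acc.1, acc.2.1 ++ [d], acc.2.2)
    else (acc.1, acc.2.1, acc.2.2 ++ [d])

-- the while loop of B (fuel as in A's port)
def pvBGo (dates : List String) (rank : PySem.Dict String Int) (nmonths : Nat)
    (tm vm tsm total e : Int) :
    Nat → Int → List (List String × List String × List String) →
    List (List String × List String × List String)
  | 0, _, res => res
  | fuel+1, i, res =>
    if i + total ≤ (nmonths : Int) then
      let p := dates.foldl (pvClassify rank i tm vm total) ([], [], [])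
      let train := if e < (p.1.length : Int) then PySem.List.slice p.1 none (some (-e)) else p.1
      pvBGo dates rank nmonths tm vm tsm total e fuel (i + tsm) (res ++ [(train, p.2.1, p.2.2)])
    else res

def purged_embargo_splits_alt (dates : List String) (train_months : Int) (val_months : Int) (test_months : Int) (embargo_days : Int) : List (List String × List String × List String) :=
  let months := pvMonthsOf dates
  let rank := pvRankOf months
  let total := train_months + val_months + test_months
  pvBGo dates rank months.length train_months val_months test_months total embargo_days
    (months.length + 1) 0 []

-- ===== PRECONDITION & SPEC =====
-- Pre_ keeps the natural domain: non-negative train/val window sizes and a positive step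
-- (negative month counts make A's slices count from the END of the month list — not window
-- semantics — and test_months ≤ 0 makes A's while loop run forever as soon as one window fits);
-- it also admits every input whose window total exceeds the number of distinct months, where
-- the loop body never runs.
def Pre_purged_embargo_splits (dates : List String) (train_months : Int) (val_months : Int) (test_months : Int) (embargo_days : Int) : Prop :=
  (0 ≤ train_months ∧ 0 ≤ val_months ∧ 1 ≤ test_months) ∨
  ((PySem.Set.ofList (dates.map pvMonthOf)).length : Int) < train_months + val_months + test_months
instance (dates : List String) (train_months : Int) (val_months : Int) (test_months : Int) (embargo_days : Int) : Decidable (Pre_purged_embargo_splits dates train_months val_months test_months embargo_days) := by unfold Pre_purged_embargo_splits; infer_instance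

def pvWitness_purged_embargo_splits : List String × Int × Int × Int × Int :=
  (["20200105", "20200212", "20200301", "20200420"], 2, 1, 1, 1)

def Spec_purged_embargo_splits (dates : List String) (train_months : Int) (val_months : Int) (test_months : Int) (embargo_days : Int) (out : List (List String × List String × List String)) : Prop := out = purged_embargo_splits_alt dates train_months val_months test_months embargo_days
instance (dates : List String) (train_months : Int) (val_months : Int) (test_months : Int) (embargo_days : Int) (out : List (List String × List String × List String)) : Decidable (Spec_purged_embargo_splits dates train_months val_months test_months embargo_days out) := by unfold Spec_purged_embargo_splits; infer_instance

-- ===== CLAIM (what is proved, stated in full; the proofs are below) =====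
def Claim_equal_purged_embargo_splits : Prop := ∀ (dates : List String) (train_months : Int) (val_months : Int) (test_months : Int) (embargo_days : Int), Dom_purged_embargo_splits dates train_months val_months test_months embargo_days → Pre_purged_embargo_splits dates train_months val_months test_months embargo_days → Spec_purged_embargo_splits dates train_months val_months test_months embargo_days (purged_embargo_splits dates train_months val_months test_months embargo_days)

-- ===== LEMMAS AND PROOFS =====

theorem pv_nodup_months (dates : List String) : (pvMonthsOf dates).Nodup := by
  have h := PySem.List.sorted_ofList_pairwise_lt (xs := dates.map pvMonthOf)
  exact (h.imp fun {a b} hlt => ne_of_lt hlt)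

theorem pv_month_mem (dates : List String) {d : String} (hd : d ∈ dates) :
    pvMonthOf d ∈ pvMonthsOf dates := by
  unfold pvMonthsOf
  rw [PySem.List.mem_sorted, PySem.Set.mem_ofList]
  exact List.mem_map_of_mem hd

theorem pv_rank_get {months : List String} (hn : months.Nodup) {m : String} (hm : m ∈ months) :
    (pvRankOf months).get? m = some ((months.idxOf m : Nat) : Int) := by
  have hitems : (pvRankOf months).items =
      PySem.Dict.empty.items ++ (PySem.List.enumerate months 0).map (fun p => (p.2, p.1)) :=
    PySem.Dict.items_foldl_insert_fresh (PySem.List.enumerate months 0)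
      (k := fun p => p.2) (v := fun p => p.1) (d := PySem.Dict.empty)
      (fun a _ => PySem.Dict.contains_empty _)
      (by rw [PySem.List.map_snd_enumerate]; exact hn)
  have hkeysnd : (pvRankOf months).keys.Nodup :=
    PySem.Dict.nodup_keys_foldl_insert_key _ _ _ _ PySem.Dict.nodup_keys_empty
  have hidx : months.idxOf m < months.length := List.idxOf_lt_length_of_mem hm
  refine PySem.Dict.get?_of_mem_items _ ?_ hkeysnd
  rw [hitems]
  apply List.mem_append_right
  refine List.mem_map.mpr ⟨((months.idxOf m : Int), m), ?_, rfl⟩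
  rw [PySem.List.mem_enumerate_iff]
  exact ⟨months.idxOf m, hidx, by simp [List.getElem_idxOf]⟩

theorem pv_mem_drop_take {l : List String} (hn : l.Nodup) {m : String} (hm : m ∈ l)
    (a b : Nat) : m ∈ (l.drop a).take (b - a) ↔ a ≤ l.idxOf m ∧ l.idxOf m < b := by
  have hidx : l.idxOf m < l.length := List.idxOf_lt_length_of_mem hm
  constructor
  · intro h
    obtain ⟨k, hk, hget⟩ := List.mem_iff_getElem.mp h
    have hk1 : k < b - a ∧ a + k < l.length := by
      simp only [List.length_take, List.length_drop, lt_min_iff] at hk; omega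
    have hgm : l[a + k]'(hk1.2) = m := by
      simpa [List.getElem_take, List.getElem_drop] using hget
    have : l.idxOf m = a + k := by rw [← hgm]; exact List.Nodup.idxOf_getElem hn _ _
    omega
  · rintro ⟨h1, h2⟩
    apply List.mem_iff_getElem.mpr
    refine ⟨l.idxOf m - a, ?_, ?_⟩
    · simp only [List.length_take, List.length_drop, lt_min_iff]; omega
    · have : a + (l.idxOf m - a) = l.idxOf m := by omega
      simp only [List.getElem_take, List.getElem_drop, this]
      exact List.getElem_idxOf hidx

theorem pv_contains_slice {months : List String} (hn : months.Nodup) {m : String}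
    (hm : m ∈ months) {a b : Int} (ha : 0 ≤ a) (hab : a ≤ b) :
    (PySem.List.slice months (some a) (some b)).contains m = true ↔
      a ≤ (months.idxOf m : Int) ∧ (months.idxOf m : Int) < b := by
  have hb : 0 ≤ b := le_trans ha hab
  rw [PySem.List.slice_toNat months ha hb]
  rw [List.contains_iff_mem, pv_mem_drop_take hn hm]
  omega

theorem pv_fold_eq_filters (months : List String) (hn : months.Nodup)
    (i tm vm tsm : Int) (hi : 0 ≤ i) (htm : 0 ≤ tm) (hvm : 0 ≤ vm) (htsm : 0 ≤ tsm)
    (dates : List String) (hmem : ∀ d ∈ dates, pvMonthOf d ∈ months) :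
    ∀ (t0 v0 s0 : List String),
    dates.foldl (pvClassify (pvRankOf months) i tm vm (tm + vm + tsm)) (t0, v0, s0) =
      (t0 ++ dates.filter (fun d => (PySem.List.slice months (some i) (some (i + tm))).contains (pvMonthOf d)),
       v0 ++ dates.filter (fun d => (PySem.List.slice months (some (i + tm)) (some (i + tm + vm))).contains (pvMonthOf d)),
       s0 ++ dates.filter (fun d => (PySem.List.slice months (some (i + tm + vm)) (some (i + tm + vm + tsm))).contains (pvMonthOf d))) := by
  induction dates with
  | nil => intro t0 v0 s0; simp
  | cons d rest ih =>
    intro t0 v0 s0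
    have hdm : pvMonthOf d ∈ months := hmem d (List.mem_cons_self)
    have hrest : ∀ x ∈ rest, pvMonthOf x ∈ months := fun x hx => hmem x (List.mem_cons_of_mem _ hx)
    have hrank := pv_rank_get hn hdm
    have hT := pv_contains_slice hn hdm (a := i) (b := i + tm) hi (by omega)
    have hV := pv_contains_slice hn hdm (a := i + tm) (b := i + tm + vm) (by omega) (by omega)
    have hS := pv_contains_slice hn hdm (a := i + tm + vm) (b := i + tm + vm + tsm) (by omega) (by omega)
    set J : Int := (months.idxOf (pvMonthOf d) : Int) with hJdef
    rw [List.foldl_cons, List.filter_cons, List.filter_cons, List.filter_cons]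
    by_cases h1 : i ≤ J ∧ J < i + tm
    · have hcd : pvClassify (pvRankOf months) i tm vm (tm + vm + tsm) (t0, v0, s0) d
          = (t0 ++ [d], v0, s0) := by
        simp only [pvClassify, hrank]; rw [if_neg (by omega), if_pos (by omega)]
      rw [hcd, if_pos (hT.mpr h1), if_neg (by rw [hV]; omega), if_neg (by rw [hS]; omega),
        ih hrest]
      simp
    · by_cases h2 : i + tm ≤ J ∧ J < i + tm + vm
      · have hcd : pvClassify (pvRankOf months) i tm vm (tm + vm + tsm) (t0, v0, s0) d
            = (t0, v0 ++ [d], s0) := by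
          simp only [pvClassify, hrank]
          rw [if_neg (by omega), if_neg (by omega), if_pos (by omega)]
        rw [hcd, if_neg (by rw [hT]; omega), if_pos (hV.mpr h2), if_neg (by rw [hS]; omega),
          ih hrest]
        simp
      · by_cases h3 : i + tm + vm ≤ J ∧ J < i + tm + vm + tsm
        · have hcd : pvClassify (pvRankOf months) i tm vm (tm + vm + tsm) (t0, v0, s0) d
              = (t0, v0, s0 ++ [d]) := by
            simp only [pvClassify, hrank]
            rw [if_neg (by omega), if_neg (by omega), if_neg (by omega)]
          rw [hcd, if_neg (by rw [hT]; omega), if_neg (by rw [hV]; omega), if_pos (hS.mpr h3),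
            ih hrest]
          simp
        · have hcd : pvClassify (pvRankOf months) i tm vm (tm + vm + tsm) (t0, v0, s0) d
              = (t0, v0, s0) := by
            simp only [pvClassify, hrank]; rw [if_pos (by omega)]
          rw [hcd, if_neg (by rw [hT]; omega), if_neg (by rw [hV]; omega), if_neg (by rw [hS]; omega)]
          exact ih hrest t0 v0 s0

theorem pv_loops_eq (dates : List String) (tm vm tsm e : Int)
    (htm : 0 ≤ tm) (hvm : 0 ≤ vm) (htsm : 1 ≤ tsm) :
    ∀ (fuel : Nat) (i : Int), 0 ≤ i → ∀ acc,
      pvAGo dates (pvMonthsOf dates) tm vm tsm e fuel i acc =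
      pvBGo dates (pvRankOf (pvMonthsOf dates)) (pvMonthsOf dates).length tm vm tsm (tm + vm + tsm) e fuel i acc := by
  intro fuel
  induction fuel with
  | zero => intro i hi acc; rfl
  | succ f ih =>
    intro i hi acc
    simp only [pvAGo, pvBGo]
    by_cases hc : i + tm + vm + tsm ≤ ((pvMonthsOf dates).length : Int)
    · have hc' : i + (tm + vm + tsm) ≤ ((pvMonthsOf dates).length : Int) := by omega
      rw [if_pos hc, if_pos hc']
      rw [pv_fold_eq_filters (pvMonthsOf dates) (pv_nodup_months dates) i tm vm tsm hi htm hvm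
        (by omega) dates (fun d hd => pv_month_mem dates hd) [] [] []]
      simp only [List.nil_append]
      exact ih (i + tsm) (by omega) _
    · rw [if_neg hc, if_neg (by omega)]

-- ===== VERDICT (by name: the statement is the Claim_ definition above) =====
theorem purged_embargo_splits_spec : Claim_equal_purged_embargo_splits := by
  intro dates tm vm tsm e _hdom hpre
  unfold Spec_purged_embargo_splits purged_embargo_splits purged_embargo_splits_alt
  rcases hpre with ⟨htm, hvm, htsm⟩ | hbig
  · exact pv_loops_eq dates tm vm tsm e htm hvm htsm ((pvMonthsOf dates).length + 1) 0 le_rfl []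
  · have hlen : ((pvMonthsOf dates).length : Int) < tm + vm + tsm := by
      unfold pvMonthsOf
      rwa [PySem.List.length_sorted]
    simp only [pvAGo, pvBGo]
    have hA : ¬ ((0 : Int) + tm + vm + tsm ≤ ((pvMonthsOf dates).length : Int)) := by omega
    have hB : ¬ ((0 : Int) + (tm + vm + tsm) ≤ ((pvMonthsOf dates).length : Int)) := by omega
    rw [if_neg hA, if_neg hB]
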